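-- pv_equiv track=rewrite | github.com/aaronbernal28/DataTopology-2025 | src/filtration_graph_builder.py | obtener_caras
-- ===== SOURCE A (Python) =====
-- from typing import List, Dict, Tuple
--
-- def obtener_caras(simplex: List[int]) -> List[List[int]]:
--     """
--     Genera todas las caras propias de un simplex.
--
--     Args:
--         simplex: lista de IDs [1, 2] o [1, 2, 3]
--
--     Returns:
--         Lista de caras (cada cara es una lista de IDs)
--     """
--     if len(simplex) <= 1:
--         return []
--
--     caras = []
--     for i in range(len(simplex)):
--         cara = simplex[:i] + simplex[i+1:]
--         caras.append(cara)
--         # Recursivamente obtener caras de la cara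
--         caras.extend(obtener_caras(cara))
--
--     return caras
-- ===== SOURCE B (Python) =====
-- def obtener_caras(simplex):
--     """Iterative pre-order DFS with an explicit stack (same output as the recursion)."""
--     if len(simplex) <= 1:
--         return []
--     stack = [simplex[:i] + simplex[i + 1:] for i in range(len(simplex))]
--     stack.reverse()
--     result = []
--     while stack:
--         cara = stack.pop()
--         result.append(cara)
--         if len(cara) > 1:
--             children = [cara[:i] + cara[i + 1:] for i in range(len(cara))]
--             stack.extend(reversed(children))
--     return result
-- ===== Notes on version B (the rewrite author's own statement) =====
-- stated objective: alternative
-- what changed: Replaced the recursive face enumeration by an iterative pre-order DFS over an explicit stack (children pushed in reverse so the same pre-order sequence, with all duplicates, is emitted).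
import Mathlib
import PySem

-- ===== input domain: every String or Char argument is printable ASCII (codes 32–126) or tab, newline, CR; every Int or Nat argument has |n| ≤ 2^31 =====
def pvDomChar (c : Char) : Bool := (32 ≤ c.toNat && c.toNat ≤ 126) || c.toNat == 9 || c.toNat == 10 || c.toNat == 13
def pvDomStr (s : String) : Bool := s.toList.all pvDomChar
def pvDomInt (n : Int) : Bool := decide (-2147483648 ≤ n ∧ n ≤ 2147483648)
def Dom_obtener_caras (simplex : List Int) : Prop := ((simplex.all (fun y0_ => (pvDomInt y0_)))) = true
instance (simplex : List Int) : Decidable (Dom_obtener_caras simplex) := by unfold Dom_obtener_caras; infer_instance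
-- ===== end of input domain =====

-- B is an iterative pre-order DFS with an explicit stack; same output (all duplicates, same order) as A's recursion.

-- ===== PORT A =====
-- simplex[:i] + simplex[i+1:] with i from range(len(simplex)): i is a nonnegative in-range
-- index, so the slices are exactly take/drop.  The loop 'caras.append; caras.extend(rec)'
-- is the foldl over the accumulator; attach carries i < len for termination.
def obtener_caras (simplex : List Int) : List (List Int) :=
  if simplex.length ≤ 1 then []
  else
    (List.range simplex.length).attach.foldl
      (fun caras i =>
        caras ++ ((simplex.take i.1 ++ simplex.drop (i.1 + 1)) ::
          obtener_caras (simplex.take i.1 ++ simplex.drop (i.1 + 1)))) []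
termination_by simplex.length
decreasing_by
  have hi := List.mem_range.mp i.2
  simp [List.length_append, List.length_take, List.length_drop]
  omega

-- ===== PORT B =====
-- The Python stack pops from the END; we model it as a Lean list whose HEAD is the stack top,
-- so 'stack.reverse(); ...pop()' / 'extend(reversed(children))' become plain list order:
-- the i-th top-level face sits i-th from the top, and children go on as 'children ++ rest'.
def pvFaces (s : List Int) : List (List Int) :=
  (List.range s.length).map (fun i => s.take i ++ s.drop (i + 1))

def pvLoop (stack : List (List Int)) (result : List (List Int)) : List (List Int) :=
  match stack with
  | [] => result
  | cara :: rest =>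
    if 1 < cara.length then
      pvLoop (pvFaces cara ++ rest) (result ++ [cara])
    else
      pvLoop rest (result ++ [cara])
termination_by (stack.map (fun c => (c.length + 1).factorial)).sum
decreasing_by
  · have key : ((List.range cara.length).map (fun i =>
        ((cara.take i ++ cara.drop (i + 1)).length + 1).factorial)).sum
        < (cara.length + 1).factorial := by
      have hlen : ∀ i ∈ List.range cara.length,
          ((cara.take i ++ cara.drop (i + 1)).length + 1).factorial
            = cara.length.factorial := by
        intro i hi
        have := List.mem_range.mp hi
        congr 1
        simp [List.length_append, List.length_take, List.length_drop]
        omega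
      rw [List.map_congr_left hlen]
      have hsum : ((List.range cara.length).map (fun _ => cara.length.factorial)).sum
          = cara.length * cara.length.factorial := by
        simp [List.sum_replicate]
      rw [hsum, Nat.factorial_succ]
      exact Nat.mul_lt_mul_of_lt_of_le (by omega) (le_refl _) (Nat.factorial_pos _)
    simp only [pvFaces, List.map_map, List.map_append, List.sum_append,
      Function.comp_def, List.map_cons, List.sum_cons]
    exact Nat.add_lt_add_right key _
  · simp only [List.map_cons, List.sum_cons]
    have : 0 < (cara.length + 1).factorial := Nat.factorial_pos _
    omega

def obtener_caras_alt (simplex : List Int) : List (List Int) :=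
  if simplex.length ≤ 1 then []
  else pvLoop (pvFaces simplex) []

-- ===== PRECONDITION & SPEC =====
def Spec_obtener_caras (simplex : List Int) (out : List (List Int)) : Prop := out = obtener_caras_alt simplex
instance (simplex : List Int) (out : List (List Int)) : Decidable (Spec_obtener_caras simplex out) := by unfold Spec_obtener_caras; infer_instance

-- ===== CLAIM (what is proved, stated in full; the proofs are below) =====
def Claim_equal_obtener_caras : Prop := ∀ (simplex : List Int), Dom_obtener_caras simplex → Spec_obtener_caras simplex (obtener_caras simplex)

-- ===== LEMMAS AND PROOFS =====

lemma obtener_caras_small (s : List Int) (h : s.length ≤ 1) :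
    obtener_caras s = [] := by
  rw [obtener_caras, if_pos h]

lemma obtener_caras_unfold (s : List Int) (h : ¬ s.length ≤ 1) :
    obtener_caras s = (pvFaces s).flatMap (fun c => c :: obtener_caras c) := by
  rw [obtener_caras, if_neg h, pvFaces,
    List.foldl_attach (l := List.range s.length) (b := ([] : List (List Int)))
      (f := fun caras i => caras ++ (s.take i ++ s.drop (i + 1)) ::
        obtener_caras (s.take i ++ s.drop (i + 1))),
    PySem.List.foldl_append_eq_flatMap
      (g := fun i => (s.take i ++ s.drop (i + 1)) ::
        obtener_caras (s.take i ++ s.drop (i + 1)))]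
  simp [List.flatMap_map]

lemma pvLoop_eq (stack result : List (List Int)) :
    pvLoop stack result = result ++ stack.flatMap (fun c => c :: obtener_caras c) := by
  induction stack, result using pvLoop.induct with
  | case1 result => simp [pvLoop]
  | case2 result cara rest h ih =>
    rw [pvLoop, if_pos h, ih, List.flatMap_append, List.flatMap_cons,
      ← obtener_caras_unfold cara (by omega)]
    simp
  | case3 result cara rest h ih =>
    rw [pvLoop, if_neg h, ih, List.flatMap_cons,
      obtener_caras_small cara (by omega)]
    simp

-- ===== VERDICT (by name: the statement is the Claim_ definition above) =====
theorem obtener_caras_spec : Claim_equal_obtener_caras := by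
  intro simplex _
  unfold Spec_obtener_caras obtener_caras_alt
  by_cases h : simplex.length ≤ 1
  · simp [h, obtener_caras]
  · rw [if_neg h, pvLoop_eq, obtener_caras_unfold simplex h, List.nil_append]
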